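-- pv_equiv track=rewrite | github.com/AdaptLabsAI/IriSync | fix_ts_errors.py | fix_firestore_references
-- ===== SOURCE A (Python) =====
-- def fix_firestore_references(content):
--     """Fix direct firestore usage to use firestoreDb with null checks"""
--     lines = content.split('\n')
--     result_lines = []
--     i = 0
--
--     while i < len(lines):
--         line = lines[i]
--
--         # Check if line uses firestore directly in collection/doc calls
--         if ('collection(firestore,' in line or
--             'doc(firestore,' in line or
--             'query(' in line and i < len(lines) - 1 and 'collection(firestore' in lines[i+1]):
--
--             # Check if we already have a null check above
--             has_null_check = False
--             for j in range(max(0, i-10), i):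
--                 if 'const firestoreDb = getFirebaseFirestore()' in lines[j]:
--                     has_null_check = True
--                     break
--
--             if not has_null_check:
--                 # Add null check before this block
--                 indent = len(line) - len(line.lstrip())
--                 result_lines.append(' ' * indent + 'const firestoreDb = getFirebaseFirestore();')
--                 result_lines.append(' ' * indent + 'if (!firestoreDb) throw new Error(\'Database not configured\');')
--                 result_lines.append('')
--
--             # Replace firestore with firestoreDb in this line
--             line = line.replace('collection(firestore,', 'collection(firestoreDb,')
--             line = line.replace('doc(firestore,', 'doc(firestoreDb,')
--
--         result_lines.append(line)
--         i += 1
--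
--     return '\n'.join(result_lines)
-- ===== SOURCE B (Python) =====
-- def fix_firestore_references(content):
--     """Fix direct firestore usage to use firestoreDb with null checks"""
--     lines = content.split('\n')
--     result_lines = []
--     last_null_check_idx = None  # index of the most recent original line containing the null-check marker
--
--     for i, line in enumerate(lines):
--         if ('collection(firestore,' in line or
--             'doc(firestore,' in line or
--             'query(' in line and i < len(lines) - 1 and 'collection(firestore' in lines[i + 1]):
--
--             has_null_check = (last_null_check_idx is not None
--                               and i - last_null_check_idx <= 10)
--
--             if not has_null_check:
--                 indent = len(line) - len(line.lstrip())
--                 result_lines.append(' ' * indent + 'const firestoreDb = getFirebaseFirestore();')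
--                 result_lines.append(' ' * indent + 'if (!firestoreDb) throw new Error(\'Database not configured\');')
--                 result_lines.append('')
--
--             out_line = line.replace('collection(firestore,', 'collection(firestoreDb,')
--             out_line = out_line.replace('doc(firestore,', 'doc(firestoreDb,')
--         else:
--             out_line = line
--
--         if 'const firestoreDb = getFirebaseFirestore()' in line:
--             last_null_check_idx = i
--
--         result_lines.append(out_line)
--
--     return '\n'.join(result_lines)
-- ===== Notes on version B (the rewrite author's own statement) =====
-- stated objective: simpler
-- what changed: The inner backward window scan over up to 10 previous lines is removed: a single forward pass tracks the index of the last line containing the null-check marker and compares i - last_null_check_idx <= 10.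
import Mathlib
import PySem

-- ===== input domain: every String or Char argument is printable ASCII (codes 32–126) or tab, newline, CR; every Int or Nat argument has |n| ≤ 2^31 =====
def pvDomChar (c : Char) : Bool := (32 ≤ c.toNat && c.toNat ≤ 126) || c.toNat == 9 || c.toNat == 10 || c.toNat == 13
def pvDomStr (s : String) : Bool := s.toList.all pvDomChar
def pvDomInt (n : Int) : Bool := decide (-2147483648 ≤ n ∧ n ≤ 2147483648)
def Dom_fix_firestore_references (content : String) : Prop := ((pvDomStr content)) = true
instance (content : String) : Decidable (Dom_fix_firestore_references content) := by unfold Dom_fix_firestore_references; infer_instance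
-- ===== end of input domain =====

-- B replaces A's inner backward 10-line window scan by one tracked index of the
-- last marker line (simpler single pass); return value proved identical.

-- shared per-line helpers (identical code in both Pythons)
def pvMarker : String := "const firestoreDb = getFirebaseFirestore()"

def pvCond (lines : List String) (i : Int) (line : String) : Bool :=
  PySem.Str.isIn "collection(firestore," line ||
  PySem.Str.isIn "doc(firestore," line ||
  (PySem.Str.isIn "query(" line && decide (i < (lines.length : Int) - 1) &&
    PySem.Str.isIn "collection(firestore" (PySem.List.pyGetD lines (i + 1) ""))

def pvGuardLines (line : String) : List String :=
  let indent := PySem.Str.len line - PySem.Str.len (PySem.Str.lstrip line)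
  let sp := String.ofList (List.replicate indent.toNat ' ')
  [sp ++ "const firestoreDb = getFirebaseFirestore();",
   sp ++ "if (!firestoreDb) throw new Error('Database not configured');",
   ""]

def pvReplaceLine (line : String) : String :=
  PySem.Str.replace (PySem.Str.replace line "collection(firestore," "collection(firestoreDb,")
    "doc(firestore," "doc(firestoreDb,"

-- ===== PORT A =====
-- inner backward scan: for j in range(max(0, i-10), i): marker in lines[j] (flag with break)
def pvA_hasNullCheck (lines : List String) (i : Int) : Bool :=
  (PySem.List.pyRange (max 0 (i - 10)) i 1).foldl
    (fun b j => b || PySem.Str.isIn pvMarker (PySem.List.pyGetD lines j "")) false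

-- the while-loop of A, one recursive call per i += 1
def pvA_loop (lines : List String) (i : Int) (res : List String) : List String :=
  if h : i < (lines.length : Int) then
    let line := PySem.List.pyGetD lines i ""
    let res :=
      if pvCond lines i line then
        let res := if !pvA_hasNullCheck lines i then res ++ pvGuardLines line else res
        res ++ [pvReplaceLine line]
      else res ++ [line]
    pvA_loop lines (i + 1) res
  else res
termination_by ((lines.length : Int) - i).toNat
decreasing_by omega

def fix_firestore_references (content : String) : String :=
  PySem.Str.join "\n" (pvA_loop ((PySem.Str.split? content "\n").getD []) 0 [])

-- ===== PORT B =====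
-- has_null_check = last_null_check_idx is not None and i - last_null_check_idx <= 10
def pvB_has (last : Option Int) (i : Int) : Bool :=
  match last with
  | some k => decide (i - k ≤ 10)
  | none => false

-- one step of B's single forward pass: state = (result_lines, last_null_check_idx)
def pvB_step (lines : List String) (st : List String × Option Int) (p : Int × String) :
    List String × Option Int :=
  let res := st.1
  let last := st.2
  let i := p.1
  let line := p.2
  let res :=
    if pvCond lines i line then
      let has := pvB_has last i
      let res := if !has then res ++ pvGuardLines line else res
      res ++ [pvReplaceLine line]
    else res ++ [line]
  let last := if PySem.Str.isIn pvMarker line then some i else last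
  (res, last)

def fix_firestore_references_alt (content : String) : String :=
  let lines := (PySem.Str.split? content "\n").getD []
  PySem.Str.join "\n" ((PySem.List.enumerate lines 0).foldl (pvB_step lines) ([], none)).1

-- ===== PRECONDITION & SPEC =====
def Spec_fix_firestore_references (content : String) (out : String) : Prop := out = fix_firestore_references_alt content
instance (content : String) (out : String) : Decidable (Spec_fix_firestore_references content out) := by unfold Spec_fix_firestore_references; infer_instance

-- ===== CLAIM (what is proved, stated in full; the proofs are below) =====
def Claim_equal_fix_firestore_references : Prop := ∀ (content : String), Dom_fix_firestore_references content → Spec_fix_firestore_references content (fix_firestore_references content)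

-- ===== LEMMAS AND PROOFS =====

-- last = the greatest index j < i of an original line containing the marker (none if no such j)
def pvLastSpec (lines : List String) (i : Nat) (last : Option Int) : Prop :=
  match last with
  | none => ∀ j < i, PySem.Str.isIn pvMarker (lines.getD j "") = false
  | some k => ∃ kn : Nat, k = (kn : Int) ∧ kn < i ∧
      PySem.Str.isIn pvMarker (lines.getD kn "") = true ∧
      ∀ j, kn < j → j < i → PySem.Str.isIn pvMarker (lines.getD j "") = false

-- the flag-accumulating inner loop of A is List.any
theorem pv_foldl_or {α : Type} (p : α → Bool) :
    ∀ (l : List α) (b : Bool), l.foldl (fun b x => b || p x) b = (b || l.any p) := by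
  intro l
  induction l with
  | nil => simp
  | cons x xs ih => intro b; simp [List.foldl, ih, Bool.or_assoc]

-- under pvLastSpec, A's window scan equals B's distance test on the tracked index
theorem pv_hasNullCheck_eq (lines : List String) (i : Nat) (last : Option Int)
    (hs : pvLastSpec lines i last) :
    pvA_hasNullCheck lines (i : Int) = pvB_has last (i : Int) := by
  unfold pvA_hasNullCheck pvB_has
  rw [pv_foldl_or, Bool.false_or]
  cases last with
  | none =>
    rw [List.any_eq_false]
    intro x hx
    rw [PySem.List.mem_pyRange_one] at hx
    obtain ⟨h1, h2⟩ := hx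
    obtain ⟨xn, rfl⟩ : ∃ xn : Nat, x = (xn : Int) := ⟨x.toNat, by omega⟩
    rw [PySem.List.pyGetD_natCast, Bool.not_eq_true]
    exact hs xn (by exact_mod_cast h2)
  | some k =>
    obtain ⟨kn, rfl, hki, hm, hrest⟩ := hs
    by_cases hd : (i : Int) - (kn : Int) ≤ 10
    · simp only [hd, decide_true]
      rw [List.any_eq_true]
      refine ⟨(kn : Int), ?_, ?_⟩
      · rw [PySem.List.mem_pyRange_one]; omega
      · rw [PySem.List.pyGetD_natCast]; exact hm
    · simp only [hd, decide_false]
      rw [List.any_eq_false]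
      intro x hx
      rw [PySem.List.mem_pyRange_one] at hx
      obtain ⟨h1, h2⟩ := hx
      obtain ⟨xn, rfl⟩ : ∃ xn : Nat, x = (xn : Int) := ⟨x.toNat, by omega⟩
      rw [PySem.List.pyGetD_natCast, Bool.not_eq_true]
      exact hrest xn (by omega) (by exact_mod_cast h2)

-- B's update of the tracked index preserves pvLastSpec
theorem pvLastSpec_step (lines : List String) (i : Nat) (last : Option Int)
    (hs : pvLastSpec lines i last) :
    pvLastSpec lines (i + 1)
      (if PySem.Str.isIn pvMarker (lines.getD i "") then some (i : Int) else last) := by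
  by_cases h : PySem.Str.isIn pvMarker (lines.getD i "") = true
  · simp only [h, if_true]
    exact ⟨i, rfl, Nat.lt_succ_self i, h, fun j hj hj' => by omega⟩
  · simp only [Bool.not_eq_true] at h
    simp only [h, Bool.false_eq_true, if_false]
    cases last with
    | none =>
      intro j hj
      rcases Nat.lt_succ_iff_lt_or_eq.mp hj with hj | rfl
      · exact hs j hj
      · exact h
    | some k =>
      obtain ⟨kn, rfl, hki, hm, hrest⟩ := hs
      refine ⟨kn, rfl, by omega, hm, fun j hj hj' => ?_⟩
      rcases Nat.lt_succ_iff_lt_or_eq.mp hj' with hj' | rfl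
      · exact hrest j hj hj'
      · exact h

-- main invariant: from any position i with a correct tracked index, A's remaining
-- while-loop and B's remaining fold produce the same result lines
theorem pv_main (lines : List String) :
    ∀ (m i : Nat), lines.length - i = m → ∀ (res : List String) (last : Option Int),
      pvLastSpec lines i last →
      pvA_loop lines (i : Int) res =
        (((PySem.List.enumerate lines 0).drop i).foldl (pvB_step lines) (res, last)).1 := by
  intro m
  induction m with
  | zero =>
    intro i hi res last _
    have hlen : lines.length ≤ i := by omega
    rw [pvA_loop, dif_neg (by omega),
      List.drop_eq_nil_of_le (by rw [PySem.List.length_enumerate]; exact hlen)]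
    rfl
  | succ m ih =>
    intro i hi res last hs
    have hil : i < lines.length := by omega
    have hc : (i : Int) < (lines.length : Int) := by exact_mod_cast hil
    have hE : i < (PySem.List.enumerate lines 0).length := by
      rw [PySem.List.length_enumerate]; exact hil
    rw [pvA_loop, dif_pos hc, List.drop_eq_getElem_cons hE, List.foldl_cons,
      PySem.List.getElem_enumerate]
    simp only [zero_add]
    have hline : PySem.List.pyGetD lines ((i : Nat) : Int) "" = lines[i] := by
      rw [PySem.List.pyGetD_natCast]
      simp [List.getD, List.getElem?_eq_getElem hil]
    have hgetD : lines.getD i "" = lines[i] := by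
      simp [List.getD, List.getElem?_eq_getElem hil]
    have hstep : pvB_step lines (res, last) ((i : Int), lines[i]) =
        ((if pvCond lines (i : Int) lines[i] then
            (if !pvB_has last (i : Int) then res ++ pvGuardLines lines[i] else res)
              ++ [pvReplaceLine lines[i]]
          else res ++ [lines[i]]),
         (if PySem.Str.isIn pvMarker lines[i] then some (i : Int) else last)) := rfl
    rw [hstep]
    have hnext : pvLastSpec lines (i + 1)
        (if PySem.Str.isIn pvMarker lines[i] then some (i : Int) else last) := by
      rw [← hgetD]
      exact pvLastSpec_step lines i last hs
    have := ih (i + 1) (by omega)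
      (if pvCond lines (i : Int) lines[i] then
          (if !pvB_has last (i : Int) then res ++ pvGuardLines lines[i] else res)
            ++ [pvReplaceLine lines[i]]
        else res ++ [lines[i]])
      (if PySem.Str.isIn pvMarker lines[i] then some (i : Int) else last) hnext
    rw [show ((i : Nat) : Int) + 1 = (((i + 1 : Nat)) : Int) by push_cast; ring] at *
    rw [← this, hline, pv_hasNullCheck_eq lines i last hs]

-- ===== VERDICT (by name: the statement is the Claim_ definition above) =====
theorem fix_firestore_references_spec : Claim_equal_fix_firestore_references := by
  intro content _
  unfold Spec_fix_firestore_references fix_firestore_references fix_firestore_references_alt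
  have h := pv_main ((PySem.Str.split? content "\n").getD []) ((PySem.Str.split? content "\n").getD []).length 0
    rfl [] none (by intro j hj; omega)
  simpa using congrArg (PySem.Str.join "\n") h
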